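-- pv_equiv track=rewrite | github.com/MrBrantCode/unitest_baseline | mut_generate/mist_train_taco/taco_4215/solution.py | determine_game_outcome
-- ===== SOURCE A (Python) =====
-- def determine_game_outcome(test_cases):
--     results = []
--
--     for n, a in test_cases:
--         b = [0] * 31
--         fl = 'DRAW'
--
--         for i in a:
--             z = bin(i)[2:].zfill(31)
--             for j in range(31):
--                 if z[j] == '1':
--                     b[j] += 1
--
--         for i in b:
--             if i % 2 == 0:
--                 continue
--             if i % 4 == 3 and (n - i) % 2 == 0:
--                 fl = 'LOSE'
--             else:
--                 fl = 'WIN'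
--             break
--
--         results.append(fl)
--
--     return results
-- ===== SOURCE B (Python) =====
-- def _row(i):
--     # pack the 31 column characters of bin(i)[2:].zfill(31) into one integer row value
--     z = bin(i)[2:].zfill(31)
--     v = 0
--     for ch in z[:31]:
--         v = 2 * v + (1 if ch == '1' else 0)
--     return v
--
--
-- def determine_game_outcome(test_cases):
--     out = []
--     for n, a in test_cases:
--         rows = [_row(i) for i in a]
--         x = 0
--         for v in rows:
--             x ^= v
--         if x == 0:
--             out.append('DRAW')
--         else:
--             k = x.bit_length() - 1  # top set bit of the column-parity vector = first odd column
--             c = sum((v >> k) & 1 for v in rows)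
--             out.append('LOSE' if c % 4 == 3 and (n - c) % 2 == 0 else 'WIN')
--     return out
-- ===== Notes on version B (the rewrite author's own statement) =====
-- stated objective: alternative
-- what changed: B drops A's 31-entry per-column count array entirely: it packs each number's 31 column bits into one integer, XOR-folds them into a single parity vector, locates the first odd column as that vector's top set bit via bit_length, and counts only that one column.
import Mathlib
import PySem

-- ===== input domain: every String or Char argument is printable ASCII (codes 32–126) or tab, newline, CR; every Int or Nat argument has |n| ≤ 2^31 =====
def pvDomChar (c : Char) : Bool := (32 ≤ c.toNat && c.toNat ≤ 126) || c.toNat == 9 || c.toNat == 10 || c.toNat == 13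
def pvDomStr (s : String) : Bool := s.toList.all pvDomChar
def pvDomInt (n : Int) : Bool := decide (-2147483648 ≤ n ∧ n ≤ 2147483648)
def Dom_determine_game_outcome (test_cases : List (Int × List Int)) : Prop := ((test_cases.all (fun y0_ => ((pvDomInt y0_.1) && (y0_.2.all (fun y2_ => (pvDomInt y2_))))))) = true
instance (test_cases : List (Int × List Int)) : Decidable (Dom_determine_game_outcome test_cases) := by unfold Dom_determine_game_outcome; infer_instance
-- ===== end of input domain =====

-- B replaces A's 31-entry per-column count array with a single XOR-folded parity
-- vector of packed 31-bit rows: the first odd column is its top set bit (bit_length)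
-- and only that one column is counted; proved equal to A on the whole domain.


-- ===== PORT A =====
-- z = bin(i)[2:].zfill(31)  (bin is PySem.Int.toBinChars0b; [2:] is slice with nonneg start);
-- shared by both ports, both Pythons compute exactly this string
def pvZ (i : Int) : List Char :=
  PySem.Chars.zfill (PySem.List.slice (PySem.Int.toBinChars0b i) (some 2) none) 31

-- the inner 'for j in range(31): if z[j]=='1': b[j] += 1' loop of A; indices j are 0..30,
-- always in range (len(z) ≥ 31, len(b) = 31), so .getD / .toNat are exact here
def pvUpdA (b : List Int) (i : Int) : List Int :=
  let z := pvZ i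
  (PySem.List.pyRange 0 31).foldl (fun b j =>
    if (PySem.List.pyGet? z j).getD ' ' = '1'
    then b.set j.toNat ((PySem.List.pyGet? b j).getD 0 + 1)
    else b) b

-- A's 'for i in b: … break' decision scan
def pvScanA (n : Int) : List Int → String
  | [] => "DRAW"
  | i :: t =>
    if PySem.Int.mod i 2 = 0 then pvScanA n t
    else if PySem.Int.mod i 4 = 3 ∧ PySem.Int.mod (n - i) 2 = 0 then "LOSE" else "WIN"

def determine_game_outcome (test_cases : List (Int × List Int)) : List String :=
  test_cases.foldl (fun results p =>
    let b := p.2.foldl pvUpdA (List.replicate 31 (0 : Int))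
    results ++ [pvScanA p.1 b]) []

-- ===== PORT B =====
-- _row(i): pack the 31 column chars of z[:31] into one integer, v = 2*v + bit
def pvRowB (i : Int) : Nat :=
  (PySem.List.slice (pvZ i) none (some 31)).foldl
    (fun v ch => 2 * v + (if ch = '1' then 1 else 0)) 0

-- x.bit_length() for a nonnegative Python int, exactly (0 for 0, floor(log2 x)+1 otherwise)
def pvBitLen (x : Nat) : Nat := if x = 0 then 0 else Nat.log2 x + 1

-- the string B appends for one test case (n, a)
def pvCaseB (p : Int × List Int) : String :=
  let rows := p.2.map pvRowB
  let x := rows.foldl (fun x v => x ^^^ v) 0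
  if x = 0 then "DRAW"
  else
    let k := pvBitLen x - 1
    let c : Int := ((rows.map (fun v => (v >>> k) &&& 1)).sum : Nat)
    if PySem.Int.mod c 4 = 3 ∧ PySem.Int.mod (p.1 - c) 2 = 0 then "LOSE" else "WIN"

def determine_game_outcome_alt (test_cases : List (Int × List Int)) : List String :=
  test_cases.foldl (fun out p => out ++ [pvCaseB p]) []

-- ===== PRECONDITION & SPEC =====
def Spec_determine_game_outcome (test_cases : List (Int × List Int)) (out : List String) : Prop := out = determine_game_outcome_alt test_cases
instance (test_cases : List (Int × List Int)) (out : List String) : Decidable (Spec_determine_game_outcome test_cases out) := by unfold Spec_determine_game_outcome; infer_instance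

-- ===== CLAIM (what is proved, stated in full; the proofs are below) =====
def Claim_equal_determine_game_outcome : Prop := ∀ (test_cases : List (Int × List Int)), Dom_determine_game_outcome test_cases → Spec_determine_game_outcome test_cases (determine_game_outcome test_cases)

-- ===== LEMMAS AND PROOFS =====

-- ---- A-side characterisation: the final b array is the list of column counts ----

def pvStep (q : Nat → Bool) (b : List Int) (j : Nat) : List Int :=
  if q j then b.set j (b.getD j 0 + 1) else b

theorem pvStep_length (q : Nat → Bool) (b : List Int) (j : Nat) :
    (pvStep q b j).length = b.length := by
  unfold pvStep; split <;> simp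

theorem pvFold_length (q : Nat → Bool) :
    ∀ (js : List Nat) (b : List Int), (js.foldl (pvStep q) b).length = b.length := by
  intro js
  induction js with
  | nil => intro b; rfl
  | cons j t ih => intro b; simp [List.foldl_cons, ih, pvStep_length]

theorem pvFold_getD (q : Nat → Bool) :
    ∀ (js : List Nat) (b : List Int), js.Nodup → ∀ (j : Nat),
      (js.foldl (pvStep q) b).getD j 0 =
        if j ∈ js ∧ j < b.length ∧ q j then b.getD j 0 + 1 else b.getD j 0 := by
  intro js
  induction js with
  | nil => intro b _ j; simp
  | cons j' t ih =>
    intro b hnd j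
    simp only [List.foldl_cons]
    rw [ih (pvStep q b j') (by simpa using hnd.of_cons) j]
    have hlen : (pvStep q b j').length = b.length := pvStep_length q b j'
    rw [hlen]
    by_cases hjj : j = j'
    · subst hjj
      have hjt : j ∉ t := by simpa using (List.nodup_cons.1 hnd).1
      rw [if_neg (fun h => hjt h.1)]
      by_cases hq : q j
      · by_cases hjb : j < b.length
        · have hs : (pvStep q b j).getD j 0 = b.getD j 0 + 1 := by
            simp [pvStep, hq, List.getD_eq_getElem?_getD, hjb]
          rw [hs, if_pos ⟨by simp, hjb, hq⟩]
        · have hs : (pvStep q b j).getD j 0 = b.getD j 0 := by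
            simp [pvStep, hq, List.getD_eq_getElem?_getD, hjb]
          rw [hs, if_neg (by tauto)]
      · have hs : (pvStep q b j).getD j 0 = b.getD j 0 := by simp [pvStep, hq]
        rw [hs, if_neg (by tauto)]
    · have hstep : (pvStep q b j').getD j 0 = b.getD j 0 := by
        unfold pvStep
        split
        · simp [List.getD_eq_getElem?_getD, Ne.symm hjj]
        · rfl
      rw [hstep]
      simp [List.mem_cons, hjj]

-- did the j-th column character of bin(i)[2:].zfill(31) come out '1'?
def pvQ (i : Int) (j : Nat) : Bool := (PySem.List.pyGet? (pvZ i) (j : Int)).getD ' ' == '1'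

theorem pvUpdA_eq (b : List Int) (i : Int) :
    pvUpdA b i = (List.range 31).foldl (pvStep (pvQ i)) b := by
  have h31 : PySem.List.pyRange 0 31 = (List.range 31).map (fun k : Nat => (k : Int)) := by
    simpa using PySem.List.pyRange_zero_natCast 31
  have hfun : ∀ (b : List Int) (j : Nat),
      (if (PySem.List.pyGet? (pvZ i) (j : Int)).getD ' ' = '1'
       then b.set ((j : Int)).toNat ((PySem.List.pyGet? b (j : Int)).getD 0 + 1)
       else b) = pvStep (pvQ i) b j := by
    intro b j
    simp [pvStep, pvQ, PySem.List.pyGet?_natCast, List.getD_eq_getElem?_getD]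
  unfold pvUpdA
  rw [h31, List.foldl_map]
  simp only [hfun]

def pvCnt (a : List Int) (j : Nat) : Int := (a.countP (fun i => pvQ i j) : Int)

theorem pvFoldUpd_length : ∀ (a b : List Int), (a.foldl pvUpdA b).length = b.length := by
  intro a
  induction a with
  | nil => intro b; rfl
  | cons i t ih => intro b; rw [List.foldl_cons, ih, pvUpdA_eq, pvFold_length]

theorem pvFoldUpd_getD : ∀ (a b : List Int), b.length = 31 → ∀ j : Nat, j < 31 →
    (a.foldl pvUpdA b).getD j 0 = b.getD j 0 + pvCnt a j := by
  intro a
  induction a with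
  | nil => intro b hb j hj; simp [pvCnt]
  | cons i t ih =>
    intro b hb j hj
    rw [List.foldl_cons, ih (pvUpdA b i) (by rw [pvUpdA_eq, pvFold_length]; exact hb) j hj]
    rw [pvUpdA_eq, pvFold_getD (pvQ i) (List.range 31) b List.nodup_range j]
    have hmem : j ∈ List.range 31 := List.mem_range.2 hj
    have hjb : j < b.length := by omega
    simp only [hmem, hjb, true_and]
    unfold pvCnt
    rw [List.countP_cons]
    by_cases hq : pvQ i j
    · simp only [hq, if_true]; push_cast; ring
    · simp only [hq]; push_cast; ring

theorem pvBfinal (a : List Int) :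
    a.foldl pvUpdA (List.replicate 31 (0 : Int)) =
      (List.range 31).map (fun j => pvCnt a j) := by
  apply List.ext_getElem
  · rw [pvFoldUpd_length]; simp
  · intro j h1 h2
    have hj : j < 31 := by simpa using h2
    have hgd := pvFoldUpd_getD a (List.replicate 31 0) (by simp) j hj
    have hrep : (List.replicate 31 (0 : Int)).getD j 0 = 0 := by
      rw [List.getD_eq_getElem _ 0 (by simpa using hj)]
      exact List.eq_of_mem_replicate (List.getElem_mem _)
    rw [← List.getD_eq_getElem _ 0 h1, hgd, hrep]
    simp

-- ---- B-side: bits of a packed row ----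

theorem pvZ_len (i : Int) : 31 ≤ (pvZ i).length := by
  unfold pvZ
  rw [PySem.Chars.length_zfill]
  omega

theorem pvTestBit_div (x k : Nat) : x.testBit k = decide (x / 2 ^ k % 2 = 1) := by
  induction k generalizing x with
  | zero => simpa using Nat.testBit_zero x
  | succ k ih =>
    rw [Nat.testBit_succ, ih, Nat.div_div_eq_div_mul]
    have : 2 * 2 ^ k = 2 ^ (k + 1) := by ring
    rw [this]

theorem pvFoldBits_testBit :
    ∀ (l : List Char) (k : Nat),
      ((l.foldl (fun v ch => 2 * v + (if ch = '1' then 1 else 0)) 0).testBit k) =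
        (decide (k < l.length) && decide (l.getD (l.length - 1 - k) ' ' = '1')) := by
  intro l
  induction l using List.reverseRecOn with
  | nil => intro k; simp [Nat.zero_testBit]
  | append_singleton t ch ih =>
    intro k
    rw [List.foldl_append]
    simp only [List.foldl_cons, List.foldl_nil]
    set w := t.foldl (fun v ch => 2 * v + (if ch = '1' then 1 else 0)) 0 with hw
    have hlen : (t ++ [ch]).length = t.length + 1 := by simp
    cases k with
    | zero =>
      rw [Nat.testBit_zero, hlen]
      have hidx : t.length + 1 - 1 - 0 = t.length := by omega
      rw [hidx]
      have hget : (t ++ [ch]).getD t.length ' ' = ch := by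
        rw [List.getD_append_right t [ch] ' ' t.length le_rfl]
        simp
      rw [hget]
      by_cases hch : ch = '1'
      · have : (2 * w + (if ch = '1' then 1 else 0)) % 2 = 1 := by
          rw [if_pos hch]; omega
        simp [hch]
      · have : (2 * w + (if ch = '1' then 1 else 0)) % 2 = 0 := by
          rw [if_neg hch]; omega
        simp [hch]
    | succ k =>
      rw [Nat.testBit_succ]
      have hdiv : (2 * w + (if ch = '1' then 1 else 0)) / 2 = w := by
        by_cases hch : ch = '1' <;> simp [hch] <;> omega
      rw [hdiv, ih k, hlen]
      by_cases hk : k < t.length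
      · have h1 : k + 1 < t.length + 1 := by omega
        have hidx : t.length + 1 - 1 - (k + 1) = t.length - 1 - k := by omega
        have hlt : t.length - 1 - k < t.length := by omega
        rw [hidx, List.getD_append t [ch] ' ' _ hlt]
        simp [hk, h1]
      · have h1 : ¬ (k + 1 < t.length + 1) := by omega
        simp [hk, h1]

theorem pvSliceZ (i : Int) : PySem.List.slice (pvZ i) none (some 31) = (pvZ i).take 31 := by
  rw [PySem.List.slice_to _ (by norm_num)]
  rfl

theorem pvTakeZ_len (i : Int) : ((pvZ i).take 31).length = 31 := by
  have := pvZ_len i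
  simp [List.length_take]
  omega

theorem pvRowB_testBit (i : Int) (k : Nat) (hk : k ≤ 30) :
    (pvRowB i).testBit k = pvQ i (30 - k) := by
  unfold pvRowB
  rw [pvSliceZ, pvFoldBits_testBit, pvTakeZ_len]
  have hk31 : k < 31 := by omega
  have hidx : 31 - 1 - k = 30 - k := by omega
  have hlt : 30 - k < 31 := by omega
  have hlen : 30 - k < (pvZ i).length := by have := pvZ_len i; omega
  have hget : ((pvZ i).take 31).getD (30 - k) ' ' = (pvZ i).getD (30 - k) ' ' := by
    simp [List.getD_eq_getElem?_getD, hlt]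
  rw [hidx, hget]
  unfold pvQ
  rw [PySem.List.pyGet?_natCast]
  have hsome : (pvZ i)[30 - k]? = some ((pvZ i)[30 - k]'hlen) := List.getElem?_eq_getElem hlen
  rw [hsome]
  by_cases hch : (pvZ i)[30 - k]'hlen = '1' <;>
    simp [hk31, List.getD_eq_getElem?_getD, hsome, hch]

theorem pvFoldBits_lt :
    ∀ (l : List Char) (v m : Nat), v < 2 ^ m →
      l.foldl (fun v ch => 2 * v + (if ch = '1' then 1 else 0)) v < 2 ^ (m + l.length) := by
  intro l
  induction l with
  | nil => intro v m hv; simpa using hv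
  | cons ch t ih =>
    intro v m hv
    rw [List.foldl_cons]
    have hstep : 2 * v + (if ch = '1' then 1 else 0) < 2 ^ (m + 1) := by
      have : (if ch = '1' then 1 else 0) ≤ 1 := by split <;> omega
      have h2 : 2 ^ (m + 1) = 2 * 2 ^ m := by ring
      omega
    have := ih _ (m + 1) hstep
    have harr : m + 1 + t.length = m + (ch :: t).length := by simp; omega
    rw [harr] at this
    exact this

theorem pvRowB_lt (i : Int) : pvRowB i < 2 ^ 31 := by
  unfold pvRowB
  rw [pvSliceZ]
  have h := pvFoldBits_lt ((pvZ i).take 31) 0 0 (by norm_num)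
  rw [pvTakeZ_len] at h
  simpa using h

-- ---- B-side: XOR fold is columnwise parity ----

theorem pvXorFold_testBit :
    ∀ (rows : List Nat) (x : Nat) (k : Nat),
      ((rows.foldl (fun x v => x ^^^ v) x).testBit k) =
        ((x.testBit k).xor (decide (rows.countP (fun v => v.testBit k) % 2 = 1))) := by
  intro rows
  induction rows with
  | nil => intro x k; simp
  | cons r t ih =>
    intro x k
    rw [List.foldl_cons, ih, Nat.testBit_xor, List.countP_cons]
    rcases Nat.mod_two_eq_zero_or_one (t.countP (fun v => v.testBit k)) with h | h <;>
      cases hr : r.testBit k <;>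
        simp [h, Nat.add_mod, Bool.xor_comm]

theorem pvXorFold_lt (rows : List Nat) (h : ∀ v ∈ rows, v < 2 ^ 31) :
    rows.foldl (fun x v => x ^^^ v) 0 < 2 ^ 31 := by
  have gen : ∀ (l : List Nat) (x : Nat), (∀ v ∈ l, v < 2 ^ 31) → x < 2 ^ 31 →
      l.foldl (fun x v => x ^^^ v) x < 2 ^ 31 := by
    intro l
    induction l with
    | nil => intro x _ hx; simpa using hx
    | cons r t ih =>
      intro x hl hx
      rw [List.foldl_cons]
      exact ih _ (fun v hv => hl v (List.mem_cons_of_mem _ hv))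
        (Nat.xor_lt_two_pow hx (hl r (List.mem_cons_self)))
  exact gen rows 0 h (by norm_num)

-- ---- top set bit via log2 ----

theorem pvTestBit_log2 (x : Nat) (hx : x ≠ 0) : x.testBit x.log2 = true := by
  rw [pvTestBit_div]
  have h1 : 2 ^ x.log2 ≤ x := Nat.log2_self_le hx
  have h2 : x < 2 ^ (x.log2 + 1) := Nat.lt_log2_self
  have hpos : 0 < 2 ^ x.log2 := Nat.two_pow_pos _
  have hle : 1 ≤ x / 2 ^ x.log2 := (Nat.one_le_div_iff hpos).2 h1
  have hlt : x / 2 ^ x.log2 < 2 := by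
    rw [Nat.div_lt_iff_lt_mul hpos]
    have hpow : 2 ^ (x.log2 + 1) = 2 ^ x.log2 * 2 := by ring
    omega
  have : x / 2 ^ x.log2 = 1 := by omega
  simp [this]

theorem pvTestBit_false_of_log2_lt (x : Nat) (k : Nat) (hk : x.log2 < k) :
    x.testBit k = false := by
  by_cases hx : x = 0
  · subst hx; exact Nat.zero_testBit k
  · apply Nat.testBit_lt_two_pow
    calc x < 2 ^ (x.log2 + 1) := Nat.lt_log2_self
    _ ≤ 2 ^ k := Nat.pow_le_pow_right (by norm_num) (by omega)

-- ---- single-column count ----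

theorem pvSum_shift_and (rows : List Nat) (k : Nat) :
    (rows.map (fun v => (v >>> k) &&& 1)).sum = rows.countP (fun v => v.testBit k) := by
  induction rows with
  | nil => rfl
  | cons r t ih =>
    rw [List.map_cons, List.sum_cons, ih, List.countP_cons]
    have hbit : (r >>> k) &&& 1 = (if r.testBit k then 1 else 0) := by
      rw [Nat.and_one_is_mod, Nat.shiftRight_eq_div_pow, pvTestBit_div]
      rcases Nat.mod_two_eq_zero_or_one (r / 2 ^ k) with h | h <;> simp [h]
    rw [hbit]
    omega

-- ---- the scan ----

theorem pvScanA_draw (n : Int) :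
    ∀ l : List Int, (∀ i ∈ l, PySem.Int.mod i 2 = 0) → pvScanA n l = "DRAW" := by
  intro l
  induction l with
  | nil => intro _; rfl
  | cons i t ih =>
    intro h
    rw [pvScanA, if_pos (h i (List.mem_cons_self))]
    exact ih (fun v hv => h v (List.mem_cons_of_mem _ hv))

theorem pvScanA_pivot (n : Int) :
    ∀ (l1 : List Int) (i : Int) (l2 : List Int), (∀ v ∈ l1, PySem.Int.mod v 2 = 0) →
      PySem.Int.mod i 2 ≠ 0 →
      pvScanA n (l1 ++ i :: l2) =
        if PySem.Int.mod i 4 = 3 ∧ PySem.Int.mod (n - i) 2 = 0 then "LOSE" else "WIN" := by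
  intro l1
  induction l1 with
  | nil =>
    intro i l2 _ hi
    rw [List.nil_append, pvScanA, if_neg hi]
  | cons v t ih =>
    intro i l2 h1 hi
    rw [List.cons_append, pvScanA, if_pos (h1 v (List.mem_cons_self))]
    exact ih i l2 (fun w hw => h1 w (List.mem_cons_of_mem _ hw)) hi

-- ---- per-case equality ----

-- column parity of the XOR accumulator
theorem pvXbit (a : List Int) (k : Nat) (hk : k ≤ 30) :
    ((a.map pvRowB).foldl (fun x v => x ^^^ v) 0).testBit k
      = decide ((a.countP (fun i => pvQ i (30 - k))) % 2 = 1) := by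
  rw [pvXorFold_testBit, List.countP_map]
  have hc : List.countP ((fun v => v.testBit k) ∘ pvRowB) a
      = a.countP (fun i => pvQ i (30 - k)) := by
    apply List.countP_congr
    intro i _
    simp [Function.comp, pvRowB_testBit i k hk]
  rw [hc]
  simp

theorem pvModTwo (c : Nat) : PySem.Int.mod ((c : Nat) : Int) 2 = ((c % 2 : Nat) : Int) := by
  rw [PySem.Int.mod_eq_emod_of_pos (by norm_num : (0:Int) < 2)]
  omega

theorem pvCaseB_draw (n : Int) (a : List Int)
    (h : (a.map pvRowB).foldl (fun x v => x ^^^ v) 0 = 0) : pvCaseB (n, a) = "DRAW" := by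
  simp only [pvCaseB]
  rw [if_pos h]

theorem pvCaseB_ne (n : Int) (a : List Int)
    (h : (a.map pvRowB).foldl (fun x v => x ^^^ v) 0 ≠ 0) :
    pvCaseB (n, a) =
      (if PySem.Int.mod ((((a.map pvRowB).countP (fun v => v.testBit (((a.map pvRowB).foldl (fun x v => x ^^^ v) 0).log2)) : Nat) : Int)) 4 = 3 ∧
          PySem.Int.mod (n - (((a.map pvRowB).countP (fun v => v.testBit (((a.map pvRowB).foldl (fun x v => x ^^^ v) 0).log2)) : Nat) : Int)) 2 = 0
       then "LOSE" else "WIN") := by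
  simp only [pvCaseB]
  rw [if_neg h]
  have hk : pvBitLen ((a.map pvRowB).foldl (fun x v => x ^^^ v) 0) - 1
      = ((a.map pvRowB).foldl (fun x v => x ^^^ v) 0).log2 := by
    unfold pvBitLen
    rw [if_neg h]
    omega
  rw [hk, pvSum_shift_and]

theorem pvPerCase (n : Int) (a : List Int) :
    pvScanA n (a.foldl pvUpdA (List.replicate 31 (0 : Int))) = pvCaseB (n, a) := by
  rw [pvBfinal]
  by_cases hx : (a.map pvRowB).foldl (fun x v => x ^^^ v) 0 = 0
  · rw [pvCaseB_draw n a hx]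
    apply pvScanA_draw
    intro i hi
    obtain ⟨j, hjmem, rfl⟩ := List.mem_map.1 hi
    have hj31 : j < 31 := List.mem_range.1 hjmem
    have hk : 30 - j ≤ 30 := by omega
    have hb := pvXbit a (30 - j) hk
    rw [hx, Nat.zero_testBit] at hb
    have hjj : 30 - (30 - j) = j := by omega
    rw [hjj] at hb
    have heven : (a.countP (fun i => pvQ i j)) % 2 = 0 := by
      rcases Nat.mod_two_eq_zero_or_one (a.countP (fun i => pvQ i j)) with h | h
      · exact h
      · rw [h] at hb; simp at hb
    unfold pvCnt
    rw [pvModTwo, heven]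
    simp
  · have hx31 : (a.map pvRowB).foldl (fun x v => x ^^^ v) 0 < 2 ^ 31 := by
      apply pvXorFold_lt
      intro v hv
      obtain ⟨i, _, rfl⟩ := List.mem_map.1 hv
      exact pvRowB_lt i
    set k0 := ((a.map pvRowB).foldl (fun x v => x ^^^ v) 0).log2 with hk0def
    have hk030 : k0 ≤ 30 := by
      by_contra hgt
      have h1 : 2 ^ k0 ≤ (a.map pvRowB).foldl (fun x v => x ^^^ v) 0 := Nat.log2_self_le hx
      have h2 : (2:Nat) ^ 31 ≤ 2 ^ k0 := Nat.pow_le_pow_right (by norm_num) (by omega)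
      omega
    have hsplit : List.range 31
        = List.range (30 - k0) ++ (30 - k0) :: List.range' (31 - k0) k0 := by
      have happ := List.range'_append (s := 0) (m := 30 - k0) (n := k0 + 1) (step := 1)
      have h1 : (0 : Nat) + 1 * (30 - k0) = 30 - k0 := by omega
      have h2 : 30 - k0 + (k0 + 1) = 31 := by omega
      rw [h1, h2] at happ
      have hsucc : List.range' (30 - k0) (k0 + 1) 1 = (30 - k0) :: List.range' (31 - k0) k0 := by
        rw [List.range'_succ]
        have : 30 - k0 + 1 = 31 - k0 := by omega
        rw [this]
      rw [List.range_eq_range', ← happ, hsucc]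
      simp [List.range_eq_range']
    rw [hsplit, List.map_append, List.map_cons]
    have hfront : ∀ v ∈ (List.range (30 - k0)).map (fun j => pvCnt a j), PySem.Int.mod v 2 = 0 := by
      intro v hv
      obtain ⟨j, hjmem, rfl⟩ := List.mem_map.1 hv
      have hj : j < 30 - k0 := List.mem_range.1 hjmem
      have hk : 30 - j ≤ 30 := by omega
      have hb := pvXbit a (30 - j) hk
      have hfalse : ((a.map pvRowB).foldl (fun x v => x ^^^ v) 0).testBit (30 - j) = false := by
        apply pvTestBit_false_of_log2_lt
        omega
      rw [hfalse] at hb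
      have hjj : 30 - (30 - j) = j := by omega
      rw [hjj] at hb
      have heven : (a.countP (fun i => pvQ i j)) % 2 = 0 := by
        rcases Nat.mod_two_eq_zero_or_one (a.countP (fun i => pvQ i j)) with h | h
        · exact h
        · rw [h] at hb; simp at hb
      unfold pvCnt
      rw [pvModTwo, heven]
      simp
    have hodd : PySem.Int.mod (pvCnt a (30 - k0)) 2 ≠ 0 := by
      have hb := pvXbit a k0 hk030
      rw [pvTestBit_log2 _ hx] at hb
      have h1 : (a.countP (fun i => pvQ i (30 - k0))) % 2 = 1 := by
        rcases Nat.mod_two_eq_zero_or_one (a.countP (fun i => pvQ i (30 - k0))) with h | h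
        · rw [h] at hb; simp at hb
        · exact h
      unfold pvCnt
      rw [pvModTwo, h1]
      simp
    rw [pvScanA_pivot n ((List.range (30 - k0)).map (fun j => pvCnt a j))
      (pvCnt a (30 - k0)) ((List.range' (31 - k0) k0).map (fun j => pvCnt a j)) hfront hodd]
    rw [pvCaseB_ne n a hx]
    have hc : ((((a.map pvRowB).countP (fun v => v.testBit k0) : Nat)) : Int)
        = pvCnt a (30 - k0) := by
      unfold pvCnt
      congr 1
      rw [List.countP_map]
      apply List.countP_congr
      intro i _
      simp [Function.comp, pvRowB_testBit i k0 hk030]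
    rw [← hk0def, hc]

-- ===== VERDICT (by name: the statement is the Claim_ definition above) =====
theorem determine_game_outcome_spec : Claim_equal_determine_game_outcome := by
  intro tc _
  unfold Spec_determine_game_outcome determine_game_outcome determine_game_outcome_alt
  rw [PySem.List.foldl_append_singleton_eq_map, PySem.List.foldl_append_singleton_eq_map]
  simp only [List.nil_append]
  exact List.map_congr_left (fun p _ => pvPerCase p.1 p.2)
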